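-- pv_equiv track=rewrite | github.com/Seonghun337/algorithm | StudyLog/BOJ_2529_부등호.py | searchMin
-- ===== SOURCE A (Python) =====
-- def getValidIneqs(ineqs, reverse = False):
--     if reverse: # >
--         n = len(ineqs)+1
--         result = [0 for _ in range(n)]
--         for i in range(n-2,-1,-1):
--             if ineqs[i] == '>':
--                 for j in range(i,-1,-1):
--                     result[j] = result[j] + 1
--                     if j > 0 and ineqs[j-1] != '>':
--                         break
--         return result
--     else: # <
--         # n = len(ineqs)+1
--         # result = [0 for _ in range(n)]
--         # for i in range(len(ineqs)):
--         #     if ineqs[i] == '<':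
--         #         for j in range(i+1,n):
--         #             result[j] = result[j] + 1
--         #             if j < n-1 and ineqs[j] != '<':
--         #                 break
--         # return result
--         n = len(ineqs)+1
--         result = [0 for _ in range(n)]
--         for i in range(n-2,-1,-1):
--             if ineqs[i] == '<':
--                 for j in range(i,-1,-1):
--                     result[j] = result[j] + 1
--                     if j > 0 and ineqs[j-1] != '<':
--                         break
--         return result
--
-- def searchMin(ineqs,k):
--     v_ineqs = getValidIneqs(ineqs, reverse=True)
--     nums = [x for x in range(0,k+1)]
--     result = []
--     for i in range(k+1):
--         result.append(nums[v_ineqs[i]])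
--         del nums[v_ineqs[i]]
--     return ''.join(list(map(str,result)))
-- ===== SOURCE B (Python) =====
-- def searchMin(ineqs, k):
--     # The minimal sequence is 0..k with each maximal run of '>' segment reversed:
--     # scan once, emit each maximal '>'-run segment back-to-front.
--     out = []
--     i = 0
--     while i <= k:
--         j = i
--         while j < k and ineqs[j] == '>':
--             j += 1
--         out.extend(range(j, i - 1, -1))
--         i = j + 1
--     return ''.join(map(str, out))
-- ===== Notes on version B (the rewrite author's own statement) =====
-- stated objective: faster
-- what changed: B replaces A's precomputed run-length table plus greedy pick-and-delete from a shrinking list by a single left-to-right scan that emits each maximal '>'-run segment of 0..k back-to-front.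
import Mathlib
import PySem

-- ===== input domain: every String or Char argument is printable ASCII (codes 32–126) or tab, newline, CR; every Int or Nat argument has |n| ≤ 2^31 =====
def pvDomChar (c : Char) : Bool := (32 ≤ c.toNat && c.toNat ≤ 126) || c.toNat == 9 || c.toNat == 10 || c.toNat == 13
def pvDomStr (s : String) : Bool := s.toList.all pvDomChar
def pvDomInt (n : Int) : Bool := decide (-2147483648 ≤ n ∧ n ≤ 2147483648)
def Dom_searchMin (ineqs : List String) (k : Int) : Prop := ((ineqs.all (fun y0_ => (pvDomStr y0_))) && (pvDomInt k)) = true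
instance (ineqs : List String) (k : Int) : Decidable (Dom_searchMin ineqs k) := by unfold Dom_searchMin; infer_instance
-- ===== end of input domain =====

-- B replaces A's run-length table + repeated delete-from-list greedy by a single
-- left-to-right scan that emits each maximal '>'-run segment of 0..k back-to-front.

-- ===== PORT A =====

-- inner loop: 'for j in range(i,-1,-1): result[j] += 1; if j>0 and ineqs[j-1] != c: break'
def pvInner (ineqs : List String) (c : String) (res : List Int) (j : Nat) : List Int :=
  if j > 0 ∧ ineqs.getD (j-1) "" ≠ c then res.modify j (· + 1)
  else if _h : j = 0 then res.modify j (· + 1)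
  else pvInner ineqs c (res.modify j (· + 1)) (j-1)
termination_by j

-- outer loop: 'for i in range(n-2,-1,-1): if ineqs[i] == c: <inner>' (fuel = i+1)
def pvGvi (ineqs : List String) (c : String) : Nat → List Int → List Int
  | 0, res => res
  | (i+1), res => pvGvi ineqs c i (if ineqs.getD i "" = c then pvInner ineqs c res i else res)

def getValidIneqs (ineqs : List String) (reverse : Bool) : List Int :=
  if reverse then pvGvi ineqs ">" ineqs.length (List.replicate (ineqs.length + 1) 0)
  else pvGvi ineqs "<" ineqs.length (List.replicate (ineqs.length + 1) 0)

-- main loop: 'for i in range(k+1): result.append(nums[v[i]]); del nums[v[i]]'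
-- (none = an IndexError of the Python; Pre_ excludes those inputs)
def pvALoop (v : List Int) (n : Nat) (i : Nat) (nums acc : List Int) : Option (List Int) :=
  if _h : i < n then
    match PySem.List.pyGet? v (i : Int) with
    | none => none
    | some idx =>
      match PySem.List.pyGet? nums idx, PySem.List.pop? nums idx with
      | some x, some r => pvALoop v n (i+1) r.2 (acc ++ [x])
      | _, _ => none
  else some acc
termination_by n - i

def searchMin (ineqs : List String) (k : Int) : String :=
  match pvALoop (getValidIneqs ineqs true) (k+1).toNat 0 (PySem.List.pyRange 0 (k+1) 1) [] with
  | some res => PySem.Str.join "" (res.map PySem.Int.toStr)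
  | none => ""

-- ===== PORT B =====

-- 'while j < k and ineqs[j] == ">": j += 1'
def pvRunEnd (ineqs : List String) (k : Nat) (j : Nat) : Nat :=
  if _h : j < k ∧ ineqs.getD j "" = ">" then pvRunEnd ineqs k (j+1) else j
termination_by k - j

-- 'while i <= k: j = runEnd; out.extend(range(j, i-1, -1)); i = j + 1'
theorem pvRunEnd_ge (ineqs : List String) (k j : Nat) : j ≤ pvRunEnd ineqs k j := by
  unfold pvRunEnd
  split
  · exact le_trans (Nat.le_succ j) (pvRunEnd_ge ineqs k (j+1))
  · exact le_refl j
termination_by k - j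
decreasing_by omega

def pvBLoop (ineqs : List String) (k : Nat) (i : Nat) : List Int :=
  if _h : i ≤ k then
    PySem.List.pyRange (pvRunEnd ineqs k i : Int) ((i : Int) - 1) (-1) ++
      pvBLoop ineqs k (pvRunEnd ineqs k i + 1)
  else []
termination_by k + 1 - i
decreasing_by have := pvRunEnd_ge ineqs k i; omega

def searchMin_alt (ineqs : List String) (k : Int) : String :=
  PySem.Str.join "" ((if k < 0 then [] else pvBLoop ineqs k.toNat 0).map PySem.Int.toStr)

-- ===== PRECONDITION & SPEC =====
-- Pre_ excludes exactly the inputs on which A raises IndexError: k > len(ineqs)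
-- (v_ineqs[i] out of range), or 0 ≤ k < len(ineqs) with ineqs[k] == '>' (the '>'
-- run crossing position k makes nums[v_ineqs[i]] out of range).
def Pre_searchMin (ineqs : List String) (k : Int) : Prop :=
  k < 0 ∨ (k ≤ (ineqs.length : Int) ∧ ineqs.getD k.toNat "" ≠ ">")
instance (ineqs : List String) (k : Int) : Decidable (Pre_searchMin ineqs k) := by
  unfold Pre_searchMin; infer_instance

def pvWitness_searchMin : List String × Int := (["<", ">"], 2)

def Spec_searchMin (ineqs : List String) (k : Int) (out : String) : Prop := out = searchMin_alt ineqs k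
instance (ineqs : List String) (k : Int) (out : String) : Decidable (Spec_searchMin ineqs k out) := by unfold Spec_searchMin; infer_instance

-- ===== CLAIM (what is proved, stated in full; the proofs are below) =====
def Claim_equal_searchMin : Prop := ∀ (ineqs : List String) (k : Int), Dom_searchMin ineqs k → Pre_searchMin ineqs k → Spec_searchMin ineqs k (searchMin ineqs k)

-- ===== LEMMAS AND PROOFS =====

-- rl ineqs j = length of the maximal run of '>' in ineqs starting at position j
def rl (ineqs : List String) (j : Nat) : Nat :=
  if _h : j < ineqs.length ∧ ineqs.getD j "" = ">" then rl ineqs (j+1) + 1 else 0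
termination_by ineqs.length - j
decreasing_by omega

-- rs ineqs j = start of the maximal run of '>' ending just before/at j (pvInner's stop point)
def rs (ineqs : List String) (j : Nat) : Nat :=
  if _h : j > 0 ∧ ineqs.getD (j-1) "" = ">" then rs ineqs (j-1) else j
termination_by j

theorem rl_unfold (ineqs : List String) (j : Nat) :
    rl ineqs j = if j < ineqs.length ∧ ineqs.getD j "" = ">" then rl ineqs (j+1) + 1 else 0 := by
  rw [rl]; split <;> simp_all

theorem rl_blocker (ineqs : List String) (m : Nat) (hb : ineqs.getD m "" ≠ ">") :
    ∀ q, q ≤ m → rl ineqs q ≤ m - q := by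
  intro q hq
  induction hmq : m - q generalizing q with
  | zero =>
    have hqm : q = m := by omega
    subst hqm
    rw [rl_unfold, if_neg (fun hc => hb hc.2)]
  | succ t ih =>
    rw [rl_unfold]
    split
    · have := ih (q+1) (by omega) (by omega)
      omega
    · omega

theorem rs_le (ineqs : List String) (j : Nat) : rs ineqs j ≤ j := by
  unfold rs
  split
  · exact le_trans (rs_le ineqs (j-1)) (by omega)
  · exact le_refl j
termination_by j
decreasing_by omega

theorem rs_mem (ineqs : List String) (m : Nat) :
    ∀ j, rs ineqs m ≤ j → j < m → ineqs.getD j "" = ">" := by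
  intro j h1 h2
  rw [rs] at h1
  split at h1
  · rename_i h
    by_cases hj : j = m - 1
    · subst hj; exact h.2
    · exact rs_mem ineqs (m-1) j h1 (by omega)
  · omega
termination_by m
decreasing_by omega

theorem rs_start (ineqs : List String) (m : Nat) :
    rs ineqs m = 0 ∨ ineqs.getD (rs ineqs m - 1) "" ≠ ">" := by
  rw [rs]
  split
  · exact rs_start ineqs (m-1)
  · rename_i h
    by_cases hm : m = 0
    · left; omega
    · right; intro hc; exact h ⟨by omega, hc⟩
termination_by m
decreasing_by omega

-- run from q reaches m when q is inside the run ending at m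
theorem run_reach (ineqs : List String) (m : Nat) (hm : ineqs.getD m "" = ">")
    (hmL : m < ineqs.length) :
    ∀ q, rs ineqs m ≤ q → q ≤ m → m + 1 ≤ q + rl ineqs q := by
  intro q h1 h2
  induction hmq : m - q generalizing q with
  | zero =>
    have : q = m := by omega
    subst this
    rw [rl_unfold, if_pos ⟨hmL, hm⟩]
    omega
  | succ t ih =>
    have hq : ineqs.getD q "" = ">" := rs_mem ineqs m q h1 (by omega)
    have hqL : q < ineqs.length := by omega
    rw [rl_unfold]
    simp only [hq, hqL, and_self, if_true]
    have := ih (q+1) (by omega) (by omega) (by omega)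
    omega

theorem pvInner_getElem? (ineqs : List String) (res : List Int) (i : Nat) :
    ∀ q, (pvInner ineqs ">" res i)[q]? =
      if rs ineqs i ≤ q ∧ q ≤ i then res[q]?.map (· + 1) else res[q]? := by
  intro q
  by_cases h : i > 0 ∧ ineqs.getD (i-1) "" = ">"
  · have hne : ¬ (i > 0 ∧ ineqs.getD (i-1) "" ≠ ">") := fun hc => hc.2 h.2
    have hi0 : ¬ i = 0 := by omega
    have hrs : rs ineqs i = rs ineqs (i-1) := by rw [rs, dif_pos h]
    rw [pvInner, if_neg hne, dif_neg hi0,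
        pvInner_getElem? ineqs (res.modify i (· + 1)) (i-1) q, hrs]
    by_cases hq : q = i
    · subst hq
      rw [if_neg (by omega : ¬ (rs ineqs (q-1) ≤ q ∧ q ≤ q - 1)),
          if_pos ⟨le_trans (rs_le ineqs (q-1)) (by omega), le_refl q⟩,
          List.getElem?_modify]
      cases res[q]? <;> simp
    · have hmodeq : (res.modify i (· + 1))[q]? = res[q]? := by
        rw [List.getElem?_modify]
        cases res[q]? <;> simp [show ¬ i = q from fun hc => hq hc.symm]
      by_cases hle : q ≤ i - 1
      · by_cases hin : rs ineqs (i-1) ≤ q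
        · rw [if_pos ⟨hin, hle⟩, if_pos ⟨hin, by omega⟩, hmodeq]
        · rw [if_neg (fun hc => hin hc.1), if_neg (fun hc => hin hc.1), hmodeq]
      · rw [if_neg (fun hc => by omega), if_neg (fun hc => by omega), hmodeq]
  · have hrs : rs ineqs i = i := by rw [rs, dif_neg h]
    have hstep : pvInner ineqs ">" res i = res.modify i (· + 1) := by
      by_cases hi0 : i = 0
      · rw [pvInner, if_neg (fun hc => by omega), dif_pos hi0]
      · rw [pvInner, if_pos ⟨by omega, fun hc => h ⟨by omega, hc⟩⟩]
    rw [hstep, hrs, List.getElem?_modify]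
    by_cases hq : q = i
    · subst hq
      rw [if_pos ⟨le_refl q, le_refl q⟩]
      cases res[q]? <;> simp
    · rw [if_neg (fun hc => hq (by omega))]
      cases res[q]? <;> simp [show ¬ i = q from fun hc => hq hc.symm]
termination_by i
decreasing_by omega

-- intermediate-state invariant: after processing outer i ≥ m, entry q holds rl q ∸ (m ∸ q)
theorem pvGvi_spec (ineqs : List String) :
    ∀ m (res : List Int),
      (∀ q, res[q]? = (res[q]?.map (fun _ => ((rl ineqs q - (m - q) : Nat) : Int)))) →
      ∀ q, (pvGvi ineqs ">" m res)[q]? = res[q]?.map (fun _ => ((rl ineqs q : Nat) : Int)) := by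
  intro m
  induction m with
  | zero =>
    intro res hres q
    unfold pvGvi
    have := hres q
    simpa using this
  | succ m ih =>
    intro res hres q
    unfold pvGvi
    by_cases hm : ineqs.getD m "" = ">"
    · simp only [hm, if_true]
      have hmL : m < ineqs.length := by
        by_contra hL
        have : ineqs.getD m "" = "" := List.getD_eq_default _ _ (by omega)
        rw [this] at hm; exact absurd hm (by decide)
      have hres' : ∀ q', (pvInner ineqs ">" res m)[q']? =
          ((pvInner ineqs ">" res m)[q']?.map (fun _ => ((rl ineqs q' - (m - q') : Nat) : Int))) := by
        intro q'
        rw [pvInner_getElem? ineqs res m q']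
        by_cases hin : rs ineqs m ≤ q' ∧ q' ≤ m
        · simp only [hin, and_self, if_true]
          have hreach := run_reach ineqs m hm hmL q' hin.1 hin.2
          have h1 : rl ineqs q' - (m + 1 - q') + 1 = rl ineqs q' - (m - q') := by omega
          have := hres q'
          cases hq' : res[q']? with
          | none => simp
          | some x =>
            rw [hq'] at this
            simp only [Option.map_some] at this ⊢
            have hx : x = ((rl ineqs q' - (m + 1 - q') : Nat) : Int) := by
              injection this
            rw [hx]
            congr 1
            push_cast [← h1]
            ring
        · simp only [hin, if_false]
          have := hres q'
          cases hq' : res[q']? with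
          | none => simp
          | some x =>
            rw [hq'] at this
            simp only [Option.map_some] at this ⊢
            have hx : x = ((rl ineqs q' - (m + 1 - q') : Nat) : Int) := by injection this
            rw [hx]
            congr 2
            -- outside the run the two truncations agree
            by_cases hgt : q' > m
            · congr 1; omega
            · -- q' < rs m : the run from q' stops before m
              have hlt : q' < rs ineqs m := by
                rcases Nat.lt_or_ge q' (rs ineqs m) with h | h
                · exact h
                · exfalso; exact hin ⟨h, by omega⟩
              have hrs0 : rs ineqs m > 0 := by omega
              rcases rs_start ineqs m with h0 | hnb
              · omega
              · have := rl_blocker ineqs (rs ineqs m - 1) hnb q' (by omega)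
                have hrsle := rs_le ineqs m
                omega
      have := ih (pvInner ineqs ">" res m) hres' q
      rw [this]
      rw [pvInner_getElem? ineqs res m q]
      by_cases hin : rs ineqs m ≤ q ∧ q ≤ m
      · simp only [hin, and_self, if_true]; cases res[q]? <;> simp
      · simp only [hin, if_false]
    · simp only [hm, if_false]
      have hres' : ∀ q', res[q']? = (res[q']?.map (fun _ => ((rl ineqs q' - (m - q') : Nat) : Int))) := by
        intro q'
        have := hres q'
        cases hq' : res[q']? with
        | none => simp
        | some x =>
          rw [hq'] at this
          simp only [Option.map_some] at this ⊢
          have hx : x = ((rl ineqs q' - (m + 1 - q') : Nat) : Int) := by injection this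
          rw [hx]
          congr 2
          by_cases hgt : q' > m
          · congr 1; omega
          · have := rl_blocker ineqs m hm q' (by omega)
            omega
      exact ih res hres' q

-- the run table A builds: v[q]? = some (rl q) for q ≤ len
theorem getValidIneqs_getElem? (ineqs : List String) (q : Nat) (hq : q ≤ ineqs.length) :
    (getValidIneqs ineqs true)[q]? = some ((rl ineqs q : Nat) : Int) := by
  unfold getValidIneqs
  simp only [if_true]
  have hinit : ∀ q', (List.replicate (ineqs.length + 1) (0:Int))[q']? =
      ((List.replicate (ineqs.length + 1) (0:Int))[q']?.map
        (fun _ => ((rl ineqs q' - (ineqs.length - q') : Nat) : Int))) := by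
    intro q'
    by_cases h : q' < ineqs.length + 1
    · rw [List.getElem?_replicate, if_pos h]
      simp only [Option.map_some]
      have hblk : ineqs.getD ineqs.length "" ≠ ">" := by
        rw [List.getD_eq_default _ _ (le_refl _)]; decide
      have := rl_blocker ineqs ineqs.length hblk q' (by omega)
      have : rl ineqs q' - (ineqs.length - q') = 0 := by omega
      rw [this]; rfl
    · rw [List.getElem?_replicate, if_neg h]; rfl
  have := pvGvi_spec ineqs ineqs.length (List.replicate (ineqs.length + 1) 0) hinit q
  rw [this, List.getElem?_replicate, if_pos (by omega)]
  rfl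

theorem pvRunEnd_eq (ineqs : List String) (K : Nat) (hb : ineqs.getD K "" ≠ ">")
    (hKL : K ≤ ineqs.length) :
    ∀ q, q ≤ K → pvRunEnd ineqs K q = q + rl ineqs q := by
  intro q hq
  induction hKq : K - q generalizing q with
  | zero =>
    have hqK : K = q := by omega
    rw [hqK] at hb
    rw [hqK, pvRunEnd, dif_neg (fun hc => absurd hc.1 (lt_irrefl q)),
        rl_unfold, if_neg (fun hc => hb hc.2)]
    omega
  | succ t ih =>
    by_cases h : ineqs.getD q "" = ">"
    · have hqL : q < ineqs.length := by omega
      rw [pvRunEnd, dif_pos ⟨by omega, h⟩, rl_unfold, if_pos ⟨hqL, h⟩,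
          ih (q+1) (by omega) (by omega)]
      omega
    · rw [pvRunEnd, dif_neg (fun hc => h hc.2), rl_unfold, if_neg (fun hc => h hc.2)]
      omega

theorem pvBLoop_unfold_run (ineqs : List String) (K : Nat) (hb : ineqs.getD K "" ≠ ">")
    (hKL : K ≤ ineqs.length) (p : Nat) (hp : p ≤ K) :
    pvBLoop ineqs K p =
      (PySem.List.pyRange (p : Int) ((p : Int) + (rl ineqs p : Int) + 1) 1).reverse ++
        pvBLoop ineqs K (p + rl ineqs p + 1) := by
  rw [pvBLoop, dif_pos hp, pvRunEnd_eq ineqs K hb hKL p hp,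
      PySem.List.pyRange_neg_one_eq_reverse]
  have h1 : ((p : Int) - 1) + 1 = (p : Int) := by ring
  have h2 : ((p + rl ineqs p : Nat) : Int) + 1 = (p : Int) + (rl ineqs p : Int) + 1 := by
    push_cast; ring
  rw [h1, h2]

-- the master invariant: mid-run state of A's main loop vs B's output
theorem master (ineqs : List String) (K : Nat) (hKL : K ≤ ineqs.length)
    (hb : ineqs.getD K "" ≠ ">") (v : List Int)
    (hv : ∀ q, q ≤ ineqs.length → v[q]? = some ((rl ineqs q : Nat) : Int)) :
    ∀ m p i0 d acc, m = K + 1 - p → p ≤ K → i0 ≤ p → p + d ≤ K → rl ineqs p = d →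
      pvALoop v (K+1) p
        (PySem.List.pyRange (i0 : Int) ((i0 : Int) + (d : Int) + 1) 1 ++
          PySem.List.pyRange ((p : Int) + (d : Int) + 1) ((K : Int) + 1) 1) acc =
      some (acc ++ (PySem.List.pyRange (i0 : Int) ((i0 : Int) + (d : Int) + 1) 1).reverse ++
        pvBLoop ineqs K (p + d + 1)) := by
  intro m
  induction m with
  | zero => intro p i0 d acc hm hp; omega
  | succ m ih =>
    intro p i0 d acc hm hp hi0 hpd hd
    rw [pvALoop]
    have hpn : p < K + 1 := by omega
    simp only [hpn, dif_pos]
    rw [PySem.List.pyGet?_natCast, hv p (by omega), hd]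
    set A := PySem.List.pyRange (i0 : Int) ((i0 : Int) + (d : Int) + 1) 1 with hA
    set B := PySem.List.pyRange ((p : Int) + (d : Int) + 1) ((K : Int) + 1) 1 with hB
    have hAsplit : A = PySem.List.pyRange (i0 : Int) ((i0 : Int) + (d : Int)) 1 ++ [(i0 : Int) + (d : Int)] := by
      rw [hA]
      have := PySem.List.pyRange_one_succ_right (a := (i0 : Int)) (b := (i0 : Int) + (d : Int)) (by omega)
      rw [← this]
    set A' := PySem.List.pyRange (i0 : Int) ((i0 : Int) + (d : Int)) 1 with hA'
    have hlenA' : A'.length = d := by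
      rw [hA', PySem.List.length_pyRange_one]; omega
    have hnums : A ++ B = A' ++ (((i0 : Int) + (d : Int)) :: B) := by
      rw [hAsplit]; simp
    have hget : PySem.List.pyGet? (A ++ B) ((d : Nat) : Int) = some ((i0 : Int) + (d : Int)) := by
      rw [PySem.List.pyGet?_natCast, hnums]
      rw [List.getElem?_append_right (by omega)]
      simp [hlenA']
    have hlt : (d : Nat) < (A ++ B).length := by
      rw [hnums]; simp [hlenA']
    have hpop : PySem.List.pop? (A ++ B) ((d : Nat) : Int) = some ((A ++ B)[(d:Nat)], (A ++ B).eraseIdx d) := by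
      exact PySem.List.pop?_natCast _ _ hlt
    have hgetE : (A ++ B)[(d : Nat)] = (i0 : Int) + (d : Int) := by
      have := hget
      rw [PySem.List.pyGet?_natCast] at this
      rw [List.getElem?_eq_getElem hlt] at this
      injection this
    have herase : (A ++ B).eraseIdx d = A' ++ B := by
      rw [hnums, List.eraseIdx_append_of_length_le (by omega), hlenA']
      simp
    simp only [hget, hpop, hgetE, herase]
    rcases Nat.eq_zero_or_pos d with hd0 | hdpos
    · -- d = 0 : last pick of the current run
      have hA'nil : A' = [] := by
        rw [hA']; exact PySem.List.pyRange_one_eq_nil (by omega)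
      have hArev : A.reverse = [(i0 : Int) + (d : Int)] := by
        rw [hAsplit, hA'nil]; simp
      rw [hA'nil, List.nil_append]
      by_cases hpK : p = K
      · rw [pvALoop, dif_neg (show ¬ (p + 1 < K + 1) by omega)]
        have hend : p + d + 1 = K + 1 := by omega
        rw [hend, pvBLoop, dif_neg (show ¬ (K + 1 ≤ K) by omega), hArev]
        simp
      · -- a new maximal run starts at p+1
        have hp1 : p + 1 ≤ K := by omega
        have hd'le : rl ineqs (p+1) ≤ K - (p+1) := rl_blocker ineqs K hb (p+1) hp1
        have hih := ih (p+1) (p+1) (rl ineqs (p+1)) (acc ++ [(i0 : Int) + (d : Int)])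
          (by omega) hp1 (le_refl _) (by omega) rfl
        have hBsplit : B =
            PySem.List.pyRange (((p+1 : Nat)) : Int) (((p+1 : Nat) : Int) + ((rl ineqs (p+1) : Nat) : Int) + 1) 1 ++
              PySem.List.pyRange (((p+1 : Nat) : Int) + ((rl ineqs (p+1) : Nat) : Int) + 1) ((K : Int) + 1) 1 := by
          rw [hB, PySem.List.pyRange_one_append ((p : Int) + (d : Int) + 1)
            (((p+1 : Nat) : Int) + ((rl ineqs (p+1) : Nat) : Int) + 1) ((K : Int) + 1)
            (by push_cast; omega) (by push_cast; omega)]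
          congr 2
          push_cast; omega
        rw [← hBsplit] at hih
        have he1 : p + d + 1 = p + 1 := by omega
        rw [he1, pvBLoop_unfold_run ineqs K hb hKL (p+1) hp1, hArev, hih]
        simp [List.append_assoc]
    · -- d > 0 : still inside the current run
      have hcond : p < ineqs.length ∧ ineqs.getD p "" = ">" := by
        by_contra hc
        rw [rl_unfold, if_neg hc] at hd
        omega
      have hrlp1 : rl ineqs (p+1) = d - 1 := by
        rw [rl_unfold, if_pos hcond] at hd
        omega
      have hih := ih (p+1) i0 (d-1) (acc ++ [(i0 : Int) + (d : Int)])
        (by omega) (by omega) (by omega) (by omega) hrlp1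
      have hcA' : PySem.List.pyRange (i0 : Int) ((i0 : Int) + ((d-1 : Nat) : Int) + 1) 1 = A' := by
        rw [hA']
        have : ((i0 : Int) + ((d-1 : Nat) : Int) + 1) = ((i0 : Int) + (d : Int)) := by omega
        rw [this]
      have hcB : PySem.List.pyRange (((p+1 : Nat) : Int) + ((d-1 : Nat) : Int) + 1) ((K : Int) + 1) 1 = B := by
        rw [hB]
        have : (((p+1 : Nat) : Int) + ((d-1 : Nat) : Int) + 1) = ((p : Int) + (d : Int) + 1) := by push_cast; omega
        rw [this]
      rw [hcA', hcB] at hih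
      have he : p + 1 + (d-1) + 1 = p + d + 1 := by omega
      rw [he] at hih
      rw [hih, hAsplit]
      simp [List.append_assoc]

theorem join_congr (xs ys : List Int) (h : xs = ys) :
    PySem.Str.join "" (xs.map PySem.Int.toStr) = PySem.Str.join "" (ys.map PySem.Int.toStr) := by
  rw [h]

-- ===== VERDICT (by name: the statement is the Claim_ definition above) =====
theorem searchMin_spec : Claim_equal_searchMin := by
  intro ineqs k _hdom hpre
  unfold Spec_searchMin searchMin searchMin_alt
  rcases Int.lt_or_le k 0 with hneg | hpos
  · have h1 : (k+1).toNat = 0 := by omega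
    rw [h1, pvALoop]
    simp [hneg]
  · have hknn : ¬ (k < 0) := by omega
    rcases hpre with h | ⟨hkL, hb⟩
    · omega
    set K := k.toNat with hK
    have hk1 : (k+1).toNat = K + 1 := by omega
    have hKL : K ≤ ineqs.length := by omega
    have hkK : k = (K : Int) := by omega
    set d := rl ineqs 0 with hd
    have hdle : d ≤ K := by
      have := rl_blocker ineqs K hb 0 (by omega)
      omega
    have hnums : PySem.List.pyRange 0 (k+1) 1 =
        PySem.List.pyRange ((0:Nat) : Int) (((0:Nat) : Int) + (d : Int) + 1) 1 ++
          PySem.List.pyRange (((0:Nat) : Int) + (d : Int) + 1) ((K : Int) + 1) 1 := by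
      rw [hkK]
      rw [PySem.List.pyRange_one_append 0 ((d : Int) + 1) ((K : Int) + 1) (by omega) (by omega)]
      congr 2 <;> push_cast <;> ring
    rw [hk1, hnums]
    rw [master ineqs K hKL hb (getValidIneqs ineqs true)
      (fun q hq => getValidIneqs_getElem? ineqs q hq)
      (K + 1) 0 0 d [] (by omega) (by omega) (le_refl _) (by omega) rfl]
    simp only [List.nil_append, hknn, if_false]
    apply join_congr
    rw [pvBLoop_unfold_run ineqs K hb hKL 0 (by omega), ← hd]
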